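-- pv_equiv track=rewrite | github.com/syang620/FinSearch-AI | backend/app/services/data_ingestion/chunker/window.py | compute_overlap_spans
-- ===== SOURCE A (Python) =====
-- from typing import List, Tuple, Callable
--
-- def compute_overlap_spans(
--     windows: List[Tuple[int, int]]
-- ) -> List[Tuple[int, int]]:
--     """
--     Compute overlap token counts between consecutive windows.
--
--     Args:
--         windows: List of (start, end) token index tuples
--
--     Returns:
--         List of (overlap_with_prev, overlap_with_next) tuples
--
--     Example:
--         >>> windows = [(0, 800), (680, 1480), (1360, 1500)]
--         >>> overlaps = compute_overlap_spans(windows)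
--         >>> overlaps
--         [(0, 120), (120, 120), (120, 0)]
--         # First window: no prev overlap, 120 tokens overlap with next
--         # Middle window: 120 tokens overlap with prev and next
--         # Last window: 120 tokens overlap with prev, no next overlap
--     """
--     overlaps = []
--
--     for i, (start, end) in enumerate(windows):
--         # Overlap with previous window
--         if i > 0:
--             prev_start, prev_end = windows[i - 1]
--             overlap_prev = max(0, prev_end - start)
--         else:
--             overlap_prev = 0
--
--         # Overlap with next window
--         if i < len(windows) - 1:
--             next_start, next_end = windows[i + 1]
--             overlap_next = max(0, end - next_start)
--         else:
--             overlap_next = 0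
--
--         overlaps.append((overlap_prev, overlap_next))
--
--     return overlaps
-- ===== SOURCE B (Python) =====
-- def compute_overlap_spans(windows):
--     # Recursive pairwise walk: carry the overlap with the previous window forward,
--     # compute each consecutive-boundary overlap exactly once, no index arithmetic.
--     def go(prev_ov, cur, rest):
--         if not rest:
--             return [(prev_ov, 0)]
--         b = max(0, cur[1] - rest[0][0])
--         return [(prev_ov, b)] + go(b, rest[0], rest[1:])
--     if not windows:
--         return []
--     return go(0, windows[0], windows[1:])
-- ===== Notes on version B (the rewrite author's own statement) =====
-- stated objective: alternative
-- what changed: B replaces A's indexed loop (which looks up windows[i-1] and windows[i+1] and computes every overlap from both sides) by a structural recursion over the list that carries the previous boundary overlap as an accumulator, computing each of the n-1 boundary overlaps exactly once and never indexing.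
import Mathlib
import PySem

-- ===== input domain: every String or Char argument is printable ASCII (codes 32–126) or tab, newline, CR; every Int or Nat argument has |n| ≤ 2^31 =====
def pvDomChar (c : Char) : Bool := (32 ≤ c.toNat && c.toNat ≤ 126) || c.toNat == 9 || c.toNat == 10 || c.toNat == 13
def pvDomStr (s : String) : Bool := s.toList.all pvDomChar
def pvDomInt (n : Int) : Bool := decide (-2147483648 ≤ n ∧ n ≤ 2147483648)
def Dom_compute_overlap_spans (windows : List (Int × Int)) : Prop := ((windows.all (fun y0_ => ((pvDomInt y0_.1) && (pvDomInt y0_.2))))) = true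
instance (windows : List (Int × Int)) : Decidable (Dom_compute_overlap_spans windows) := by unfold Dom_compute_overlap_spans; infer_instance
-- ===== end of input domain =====

-- B replaces A's indexed loop by a structural recursion carrying the previous boundary
-- overlap as an accumulator, so each boundary overlap is computed once and no indexing
-- is done; same return value (alternative decomposition).

-- ===== PORT A =====
-- literal transliteration of A: enumerate loop, each guarded branch reads windows[i-1] /
-- windows[i+1] (always in range when the guard holds, so pyGetD's default is never used)
def compute_overlap_spans (windows : List (Int × Int)) : List (Int × Int) :=
  (PySem.List.enumerate windows).foldl
    (fun overlaps p =>
      overlaps ++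
        [((if p.1 > 0 then
             max 0 ((PySem.List.pyGetD windows (p.1 - 1) (0, 0)).2 - p.2.1)
           else 0),
          (if p.1 < (windows.length : Int) - 1 then
             max 0 (p.2.2 - (PySem.List.pyGetD windows (p.1 + 1) (0, 0)).1)
           else 0))])
    []

-- ===== PORT B =====
-- recursive helper `go` of Source B: prev_ov is the overlap with the previous window
def goAlt (prev_ov : Int) (cur : Int × Int) : List (Int × Int) → List (Int × Int)
  | [] => [(prev_ov, 0)]
  | r :: rs =>
    let b := max 0 (cur.2 - r.1)
    [(prev_ov, b)] ++ goAlt b r rs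

def compute_overlap_spans_alt (windows : List (Int × Int)) : List (Int × Int) :=
  match windows with
  | [] => []
  | w :: ws => goAlt 0 w ws

-- ===== PRECONDITION & SPEC =====
def Spec_compute_overlap_spans (windows : List (Int × Int)) (out : List (Int × Int)) : Prop := out = compute_overlap_spans_alt windows
instance (windows : List (Int × Int)) (out : List (Int × Int)) : Decidable (Spec_compute_overlap_spans windows out) := by unfold Spec_compute_overlap_spans; infer_instance

-- ===== CLAIM (what is proved, stated in full; the proofs are below) =====
def Claim_equal_compute_overlap_spans : Prop := ∀ (windows : List (Int × Int)), Dom_compute_overlap_spans windows → Spec_compute_overlap_spans windows (compute_overlap_spans windows)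

-- ===== LEMMAS AND PROOFS =====

theorem getElem_enumerate {α : Type} (xs : List α) (s : Int) (k : Nat) (h : k < xs.length) :
    (PySem.List.enumerate xs s)[k]'(by simpa [PySem.List.length_enumerate] using h)
      = (s + k, xs[k]) := by
  induction xs generalizing s k with
  | nil => simp at h
  | cons x xs ih =>
    cases k with
    | zero => simp [PySem.List.enumerate_cons]
    | succ k =>
      simp only [PySem.List.enumerate_cons, List.getElem_cons_succ]
      rw [ih (s + 1) k (by simpa using h)]
      push_cast; ring_nf

-- boundary-overlap list of w :: ws, each overlap stated once
def bnds (w : Int × Int) (ws : List (Int × Int)) : List Int :=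
  ((w :: ws).zip ws).map (fun q => max 0 (q.1.2 - q.2.1))

-- characterisation of B's recursion via the boundary list
theorem goAlt_eq_zip (ws : List (Int × Int)) : ∀ (w : Int × Int) (p : Int),
    goAlt p w ws = List.zip (p :: bnds w ws) (bnds w ws ++ [0]) := by
  induction ws with
  | nil => intro w p; rfl
  | cons r rs ih =>
    intro w p
    simp only [goAlt, bnds, List.zip_cons_cons, List.cons_append]
    rw [ih r (max 0 (w.2 - r.1))]
    rfl

theorem compute_overlap_spans_spec' (windows : List (Int × Int)) :
    compute_overlap_spans windows = compute_overlap_spans_alt windows := by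
  cases windows with
  | nil => rfl
  | cons w0 ws =>
  show _ = goAlt 0 w0 ws
  rw [goAlt_eq_zip]
  set bs := bnds w0 ws with hbs
  have hblen : bs.length = ws.length := by simp [hbs, bnds, List.length_zip]
  have hbget : ∀ (j : Nat) (hj : j < ws.length),
      bs[j]'(by omega) = max 0 (((w0 :: ws)[j]'(by simp; omega)).2 - (ws[j]'hj).1) := by
    intro j hj
    simp [hbs, bnds, List.getElem_zip]
  unfold compute_overlap_spans
  rw [PySem.List.foldl_append_singleton_eq_map, List.nil_append]
  apply List.ext_getElem
  · simp [PySem.List.length_enumerate, List.length_zip, hblen]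
  · intro k hk1 hk2
    have hk : k < (w0 :: ws).length := by
      simpa [PySem.List.length_enumerate] using hk1
    rw [List.getElem_map, getElem_enumerate _ _ k hk, List.getElem_zip, Prod.mk.injEq]
    simp only [zero_add]
    refine ⟨?_, ?_⟩
    · -- prev component
      cases k with
      | zero => simp
      | succ j =>
        have hj : j < ws.length := by simpa using hk
        rw [if_pos (by push_cast; omega : ((j + 1 : Nat) : Int) > 0)]
        rw [show (((j + 1 : Nat) : Int) - 1) = ((j : Nat) : Int) by push_cast; ring]
        rw [PySem.List.pyGetD_natCast, List.getD_eq_getElem _ _ (by simp; omega),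
            List.getElem_cons_succ, List.getElem_cons_succ]
        exact (hbget j hj).symm
    · -- next component
      by_cases hlast : k + 1 < (w0 :: ws).length
      · have hk' : k < ws.length := by simpa using hlast
        rw [if_pos (by push_cast; simp; omega : ((k : Nat) : Int) < ((w0 :: ws).length : Int) - 1)]
        rw [show (((k : Nat) : Int) + 1) = ((k + 1 : Nat) : Int) by push_cast; ring]
        rw [PySem.List.pyGetD_natCast, List.getD_eq_getElem _ _ (by simpa using hlast),
            List.getElem_cons_succ,
            List.getElem_append_left (by omega)]
        exact (hbget k hk').symm
      · rw [if_neg (by push_cast; simp; simp at hlast; omega)]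
        have hkl : k = ws.length := by simp at hk hlast; omega
        rw [List.getElem_append_right (by omega)]
        simp [hblen, hkl]

-- ===== VERDICT (by name: the statement is the Claim_ definition above) =====
theorem compute_overlap_spans_spec : Claim_equal_compute_overlap_spans := by
  intro windows _
  exact compute_overlap_spans_spec' windows
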